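-- pv_equiv track=rewrite | github.com/utumbo/Yandex-lyceum-Python-course | Level 2. Коллекции/Полупалиндром/main.py | find_half_palindrome_index
-- ===== SOURCE A (Python) =====
-- def find_half_palindrome_index(s):
--     left = 0
--     right = len(s) - 1
--
--     while left < right:
--         if s[left] == s[right]:
--             left += 1
--             right -= 1
--         else:
--             return left
--
--     return len(s)
-- ===== SOURCE B (Python) =====
-- def find_half_palindrome_index(s):
--     # Answer = length of the longest common prefix of s and its reverse
--     # (n if s is a palindrome).  Prefix equality is monotone in the prefix
--     # length, so binary-search the boundary instead of scanning characters.
--     t = s[::-1]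
--     if s == t:
--         return len(s)
--     lo, hi = 0, len(s)
--     # invariant: s[:lo] == t[:lo] and s[:hi] != t[:hi]
--     while hi - lo > 1:
--         mid = (lo + hi) // 2
--         if s[:mid] == t[:mid]:
--             lo = mid
--         else:
--             hi = mid
--     return lo
-- ===== Notes on version B (the rewrite author's own statement) =====
-- stated objective: alternative
-- what changed: Replaces the two-pointer character scan by a binary search over prefix lengths: the answer equals the length of the longest common prefix of s and its reverse, and since prefix equality is monotone, B bisects [0, len(s)] comparing whole slices s[:mid] == t[:mid].
import Mathlib
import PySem

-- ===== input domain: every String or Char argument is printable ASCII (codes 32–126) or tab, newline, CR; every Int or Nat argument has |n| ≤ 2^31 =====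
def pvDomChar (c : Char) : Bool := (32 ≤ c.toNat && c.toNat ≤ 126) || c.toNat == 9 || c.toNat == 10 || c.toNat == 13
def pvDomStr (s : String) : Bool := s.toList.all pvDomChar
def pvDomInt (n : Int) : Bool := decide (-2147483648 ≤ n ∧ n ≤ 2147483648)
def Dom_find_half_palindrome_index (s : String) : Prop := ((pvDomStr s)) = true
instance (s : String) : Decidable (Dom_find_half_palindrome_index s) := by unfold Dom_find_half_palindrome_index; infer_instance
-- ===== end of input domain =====

-- B replaces A's two-pointer character scan by a binary search over prefix lengths of
-- s and its reverse (the answer is their longest common prefix length); alternative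
-- algorithm of similar cost, equivalence proved for all strings.


-- ===== PORT A =====
-- A's while loop, step for step; `fuel` is only a totality device (fuel = len(s)
-- always suffices: `left` grows by 1 per iteration and the loop exits once
-- left ≥ right, so it iterates < len(s) times; the fuel-0 branch is unreachable
-- at the actual call).  `left`/`right` are Nat: both stay ≥ 0 whenever the loop
-- body runs; for the empty string Python's right = -1 and Nat's right = 0 both
-- fail `left < right` immediately without indexing, so the clamp is unobservable.
def pvALoop (cs : List Char) (fuel : Nat) (left right : Nat) : Int :=
  match fuel with
  | 0 => (cs.length : Int)
  | f + 1 =>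
    if left < right then
      if cs[left]? = cs[right]? then pvALoop cs f (left + 1) (right - 1)
      else (left : Int)
    else (cs.length : Int)

def find_half_palindrome_index (s : String) : Int :=
  pvALoop s.toList s.toList.length 0 (s.toList.length - 1)

-- ===== PORT B =====
-- Source B's binary search; s[:mid] with 0 ≤ mid ≤ len(s) is exactly List.take mid,
-- and (lo+hi)//2 on nonnegative ints is exactly Nat division.  `fuel` is only a
-- totality device (fuel = len(s) suffices: hi - lo shrinks by ≥ 1 per iteration;
-- the fuel-0 branch is unreachable at the actual call).
def pvBSearch (cs rs : List Char) (fuel : Nat) (lo hi : Nat) : Int :=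
  match fuel with
  | 0 => (lo : Int)
  | f + 1 =>
    if hi - lo > 1 then
      let mid := (lo + hi) / 2
      if cs.take mid = rs.take mid then pvBSearch cs rs f mid hi
      else pvBSearch cs rs f lo mid
    else (lo : Int)

def find_half_palindrome_index_alt (s : String) : Int :=
  let cs := s.toList
  let rs := cs.reverse          -- s[::-1]
  if cs = rs then (cs.length : Int)
  else pvBSearch cs rs cs.length 0 cs.length

-- ===== PRECONDITION & SPEC =====
def Spec_find_half_palindrome_index (s : String) (out : Int) : Prop := out = find_half_palindrome_index_alt s
instance (s : String) (out : Int) : Decidable (Spec_find_half_palindrome_index s out) := by unfold Spec_find_half_palindrome_index; infer_instance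

-- ===== CLAIM (what is proved, stated in full; the proofs are below) =====
def Claim_equal_find_half_palindrome_index : Prop := ∀ (s : String), Dom_find_half_palindrome_index s → Spec_find_half_palindrome_index s (find_half_palindrome_index s)

-- ===== LEMMAS AND PROOFS =====

-- K cs = first index where cs and cs.reverse differ (cs.length if none): the common
-- reference value both ports are shown to compute.
def pvK (cs : List Char) : Nat :=
  List.findIdx (fun q => q.1 != q.2) (cs.zip cs.reverse)

lemma pvK_le (cs : List Char) : pvK cs ≤ cs.length := by
  have := List.findIdx_le_length (p := fun q : Char × Char => q.1 != q.2)
    (xs := cs.zip cs.reverse)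
  simpa [pvK] using this

lemma pvK_eq_before (cs : List Char) (i : Nat) (hi : i < pvK cs) (hn : i < cs.length) :
    cs[i]'hn = cs.reverse[i]'(by simpa using hn) := by
  have h := List.not_of_lt_findIdx (p := fun q : Char × Char => q.1 != q.2)
    (xs := cs.zip cs.reverse) hi
  have hz : i < (cs.zip cs.reverse).length := by simpa using hn
  rw [List.getElem_zip] at h
  simpa using h

lemma pvK_ne_at (cs : List Char) (h : pvK cs < cs.length) :
    cs[pvK cs]'h ≠ cs.reverse[pvK cs]'(by simpa using h) := by
  have hz : pvK cs < (cs.zip cs.reverse).length := by simpa using h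
  have hp := List.findIdx_getElem (p := fun q : Char × Char => q.1 != q.2)
    (xs := cs.zip cs.reverse) (w := hz)
  rw [List.getElem_zip] at hp
  simpa [pvK] using hp

-- Index congruence for getElem (avoids dependent-rewrite motive issues).
lemma get_idx_congr (cs : List Char) {i j : Nat} (h : i = j) (hi : i < cs.length) :
    cs[i]'hi = cs[j]'(h ▸ hi) := by subst h; rfl

-- The mirror identity: reverse indexing.
lemma rev_get (cs : List Char) (i : Nat) (h : i < cs.length) :
    cs.reverse[i]'(by simpa using h) = cs[cs.length - 1 - i]'(by omega) :=
  List.getElem_reverse ..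

-- When A's loop has closed the pointers (l ≥ n-1-l) with no mismatch below l,
-- the string is a palindrome: any mismatch K < n would force, by minimality of K,
-- the strictly earlier mirror index n-1-K to mismatch too — impossible.
lemma K_eq_len (cs : List Char) (l : Nat) (hl : l ≤ pvK cs)
    (hge : ¬ l < cs.length - 1 - l) : pvK cs = cs.length := by
  by_contra hne
  have hKn : pvK cs < cs.length := lt_of_le_of_ne (pvK_le cs) hne
  have hmir : cs.length - 1 - pvK cs < cs.length := by omega
  have hne' : cs[pvK cs]'hKn ≠ cs[cs.length - 1 - pvK cs]'hmir := by
    intro hcontra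
    exact pvK_ne_at cs hKn (hcontra.trans (rev_get cs (pvK cs) hKn).symm)
  have hKlt : pvK cs < cs.length - 1 - pvK cs := by
    rcases Nat.lt_trichotomy (pvK cs) (cs.length - 1 - pvK cs) with h | h | h
    · exact h
    · exact absurd (get_idx_congr cs h hKn) hne'
    · exfalso
      have hb := pvK_eq_before cs (cs.length - 1 - pvK cs) h hmir
      have hb2 := rev_get cs (cs.length - 1 - pvK cs) hmir
      have hidx : cs.length - 1 - (cs.length - 1 - pvK cs) = pvK cs := by omega
      have hb3 := get_idx_congr cs hidx (by omega)
      exact hne' ((hb.trans hb2).trans hb3).symm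
  omega

-- ===== A = K =====
lemma aloop_eq_K (cs : List Char) (fuel : Nat) : ∀ l, l ≤ pvK cs →
    cs.length ≤ fuel + 2 * l → pvALoop cs fuel l (cs.length - 1 - l) = (pvK cs : Int) := by
  induction fuel with
  | zero =>
    intro l hl hf
    have hK := K_eq_len cs l hl (by omega)
    simp [pvALoop, hK]
  | succ f ih =>
    intro l hl hf
    rw [pvALoop]
    by_cases hlt : l < cs.length - 1 - l
    · rw [if_pos hlt]
      have hln : l < cs.length := by omega
      have hrn : cs.length - 1 - l < cs.length := by omega
      have hget : cs[l]? = some (cs[l]'hln) := List.getElem?_eq_getElem hln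
      have hget' : cs[cs.length - 1 - l]? = some (cs[cs.length - 1 - l]'hrn) :=
        List.getElem?_eq_getElem hrn
      by_cases heq : cs[l]'hln = cs[cs.length - 1 - l]'hrn
      · have hopteq : cs[l]? = cs[cs.length - 1 - l]? := by rw [hget, hget', heq]
        rw [if_pos hopteq]
        -- l itself matches its mirror, so K ≠ l, hence l + 1 ≤ K
        have hKl : pvK cs ≠ l := by
          intro hKeq
          have hK : pvK cs < cs.length := by omega
          apply pvK_ne_at cs hK
          have h1 := rev_get cs (pvK cs) hK
          have h2 := get_idx_congr cs hKeq hK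
          have hidx : cs.length - 1 - l = cs.length - 1 - pvK cs := by omega
          have h3 := get_idx_congr cs hidx hrn
          rw [h1]
          exact (h2.trans heq).trans h3
        rw [show cs.length - 1 - l - 1 = cs.length - 1 - (l + 1) from by omega]
        exact ih (l + 1) (by omega) (by omega)
      · have hoptne : ¬ cs[l]? = cs[cs.length - 1 - l]? := by
          rw [hget, hget']; simpa using heq
        rw [if_neg hoptne]
        -- mismatch at l with K ≥ l forces K = l
        have : ¬ l < pvK cs := by
          intro hK
          exact heq (by rw [← rev_get cs l hln]; exact pvK_eq_before cs l hK hln)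
        have : pvK cs = l := by omega
        rw [this]
    · rw [if_neg hlt, K_eq_len cs l hl hlt]

-- ===== take-equality machinery for B =====
lemma takeEq_mono (cs rs : List Char) {a b : Nat} (hab : a ≤ b)
    (h : cs.take b = rs.take b) : cs.take a = rs.take a := by
  have : (cs.take b).take a = (rs.take b).take a := by rw [h]
  simpa [List.take_take, Nat.min_eq_left hab] using this

lemma takeEq_of_lt_K (cs : List Char) (j : Nat) (hj : j ≤ pvK cs) :
    cs.take j = cs.reverse.take j := by
  apply List.ext_getElem?
  intro i
  by_cases hij : i < j
  · rw [List.getElem?_take, List.getElem?_take]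
    simp only [if_pos hij]
    by_cases hin : i < cs.length
    · have h1 : cs[i]? = some (cs[i]'hin) := List.getElem?_eq_getElem hin
      have h2 : cs.reverse[i]? = some (cs.reverse[i]'(by simpa using hin)) :=
        List.getElem?_eq_getElem (by simpa using hin)
      rw [h1, h2, pvK_eq_before cs i (by omega) hin]
    · rw [List.getElem?_eq_none (by omega), List.getElem?_eq_none (by simpa using hin)]
  · rw [List.getElem?_take, List.getElem?_take]
    simp [hij]

lemma not_takeEq_K_succ (cs : List Char) (hK : pvK cs < cs.length) :
    cs.take (pvK cs + 1) ≠ cs.reverse.take (pvK cs + 1) := by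
  intro h
  have h1 : (cs.take (pvK cs + 1))[pvK cs]? = (cs.reverse.take (pvK cs + 1))[pvK cs]? := by
    rw [h]
  rw [List.getElem?_take, List.getElem?_take] at h1
  simp only [if_pos (Nat.lt_succ_self _)] at h1
  have hg1 : cs[pvK cs]? = some (cs[pvK cs]'hK) := List.getElem?_eq_getElem hK
  have hg2 : cs.reverse[pvK cs]? = some (cs.reverse[pvK cs]'(by simpa using hK)) :=
    List.getElem?_eq_getElem (by simpa using hK)
  rw [hg1, hg2] at h1
  exact pvK_ne_at cs hK (Option.some.inj h1)

-- The binary search returns the boundary k.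
lemma bsearch_eq (cs rs : List Char) (k : Nat)
    (hk1 : cs.take k = rs.take k) (hk2 : cs.take (k + 1) ≠ rs.take (k + 1))
    (fuel : Nat) : ∀ lo hi, lo ≤ k → k < hi → hi - lo ≤ fuel + 1 →
    pvBSearch cs rs fuel lo hi = (k : Int) := by
  induction fuel with
  | zero =>
    intro lo hi hlo hhi hgap
    have : lo = k := by omega
    simp [pvBSearch, this]
  | succ f ih =>
    intro lo hi hlo hhi hgap
    rw [pvBSearch]
    by_cases hg : hi - lo > 1
    · rw [if_pos hg]
      by_cases hmid : cs.take ((lo + hi) / 2) = rs.take ((lo + hi) / 2)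
      · rw [if_pos hmid]
        have : (lo + hi) / 2 ≤ k := by
          by_contra hgt
          exact hk2 (takeEq_mono cs rs (by omega) hmid)
        exact ih _ hi this hhi (by omega)
      · rw [if_neg hmid]
        have : k < (lo + hi) / 2 := by
          by_contra hle
          exact hmid (takeEq_mono cs rs (by omega) hk1)
        exact ih lo _ hlo this (by omega)
    · rw [if_neg hg]
      omega

-- ===== VERDICT (by name: the statement is the Claim_ definition above) =====
theorem find_half_palindrome_index_spec : Claim_equal_find_half_palindrome_index := by
  intro s _
  unfold Spec_find_half_palindrome_index find_half_palindrome_index find_half_palindrome_index_alt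
  have hA := aloop_eq_K s.toList s.toList.length 0 (Nat.zero_le _) (by omega)
  rw [show s.toList.length - 1 - 0 = s.toList.length - 1 from by omega] at hA
  rw [hA]
  by_cases hp : s.toList = s.toList.reverse
  · show (pvK s.toList : Int) =
      if s.toList = s.toList.reverse then (s.toList.length : Int)
      else pvBSearch s.toList s.toList.reverse s.toList.length 0 s.toList.length
    rw [if_pos hp]
    -- palindrome ⇒ K = length
    congr 1
    by_contra hne
    have hK : pvK s.toList < s.toList.length := lt_of_le_of_ne (pvK_le _) hne
    have hq : s.toList[pvK s.toList]? = s.toList.reverse[pvK s.toList]? :=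
      congrArg (fun l => l[pvK s.toList]?) hp
    rw [List.getElem?_eq_getElem hK,
      List.getElem?_eq_getElem (by simpa using hK)] at hq
    exact pvK_ne_at s.toList hK (Option.some.inj hq)
  · show (pvK s.toList : Int) =
      if s.toList = s.toList.reverse then (s.toList.length : Int)
      else pvBSearch s.toList s.toList.reverse s.toList.length 0 s.toList.length
    rw [if_neg hp]
    have hK : pvK s.toList < s.toList.length := by
      rcases lt_or_eq_of_le (pvK_le s.toList) with h | h
      · exact h
      · exfalso
        apply hp
        have ht := takeEq_of_lt_K s.toList s.toList.length (le_of_eq h.symm)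
        simpa [List.take_of_length_le] using ht
    exact (bsearch_eq s.toList s.toList.reverse (pvK s.toList)
      (takeEq_of_lt_K s.toList _ le_rfl) (not_takeEq_K_succ s.toList hK)
      s.toList.length 0 s.toList.length (Nat.zero_le _) hK (by omega)).symm
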